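-- pv_equiv track=rewrite | github.com/ubs121/alg | container/disjointSets.py | union_find
-- ===== SOURCE A (Python) =====
-- from typing import List
--
-- def union_find(pairs: List):
--     pairs = map(set, pairs)
--     groups = []
--     for pair in pairs:
--         temp1 = [] # temp unions
--         for grp in groups:
--             if grp.isdisjoint(pair):
--                 temp1.append(grp) # append back
--             else:
--                 pair = grp.union(pair) # join
--
--         temp1.append(pair)
--         groups = temp1
--     return groups
-- ===== SOURCE B (Python) =====
-- def union_find(pairs):
--     groups = {}   # group id -> set of elements; insertion order == increasing id
--     where = {}    # element -> id of the group currently containing it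
--     next_id = 0
--     for pair in pairs:
--         pair = set(pair)
--         ids = sorted({where[x] for x in pair if x in where})
--         for i in ids:
--             pair = groups.pop(i) | pair
--         groups[next_id] = pair
--         for x in pair:
--             where[x] = next_id
--         next_id += 1
--     return list(groups.values())
-- ===== Notes on version B (the rewrite author's own statement) =====
-- stated objective: faster
-- what changed: A rescans the entire list of groups for every pair; B keeps an element-to-group-id dict plus an id-keyed group dict, so each pair only touches the groups it actually overlaps (looked up per element), merging them in id order.
import Mathlib
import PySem

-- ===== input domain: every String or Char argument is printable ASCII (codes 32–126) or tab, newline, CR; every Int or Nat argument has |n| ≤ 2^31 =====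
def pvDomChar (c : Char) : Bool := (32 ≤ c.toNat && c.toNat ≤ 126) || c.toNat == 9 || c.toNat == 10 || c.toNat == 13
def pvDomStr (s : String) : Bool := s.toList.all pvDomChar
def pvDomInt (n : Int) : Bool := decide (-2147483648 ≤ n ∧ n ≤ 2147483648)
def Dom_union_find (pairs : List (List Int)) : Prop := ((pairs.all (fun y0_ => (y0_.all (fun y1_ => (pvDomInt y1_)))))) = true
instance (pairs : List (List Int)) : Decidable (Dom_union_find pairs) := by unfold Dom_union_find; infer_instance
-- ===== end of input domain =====

-- B replaces A's per-pair rescan of the whole group list by an element→group-id dict index, merging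
-- only the groups a pair actually hits; same return value. Objective: faster on many-group inputs.

-- ===== PORT A =====
-- inner loop body of A: keep the disjoint groups, grow the current pair by the overlapping ones
def pvStepA (st : List (List Int) × List Int) (grp : List Int) : List (List Int) × List Int :=
  if PySem.Set.isdisjoint grp st.2 then (st.1 ++ [grp], st.2) else (st.1, PySem.Set.union grp st.2)

-- A's inner loop, named: kept groups ++ merge of the (statically) overlapping groups

def union_find (pairs : List (List Int)) : List (List Int) :=
  pairs.foldl (fun groups pr =>
    let r := groups.foldl pvStepA ([], PySem.Set.ofList pr)
    r.1 ++ [r.2]) []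

-- ===== PORT B =====
-- 'pair = groups.pop(i) | pair' (the getD default is unreachable: i is always a present key)
def pvMergeB (gp : PySem.Dict Int (List Int) × List Int) (i : Int) :
    PySem.Dict Int (List Int) × List Int :=
  (gp.1.erase i, PySem.Set.union (gp.1.getD i PySem.Set.empty) gp.2)

-- one iteration of B's main loop over 'pairs'; state = (groups, where, next_id)
def pvStepB (st : PySem.Dict Int (List Int) × PySem.Dict Int Int × Int) (pr : List Int) :
    PySem.Dict Int (List Int) × PySem.Dict Int Int × Int :=
  let pair0 := PySem.Set.ofList pr
  let ids := PySem.List.sorted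
      (PySem.Set.ofList (pair0.filterMap (fun x => st.2.1.get? x))) (fun i => i) false
  let gp := ids.foldl pvMergeB (st.1, pair0)
  (gp.1.insert st.2.2 gp.2, gp.2.foldl (fun w x => w.insert x st.2.2) st.2.1, st.2.2 + 1)

def union_find_alt (pairs : List (List Int)) : List (List Int) :=
  (pairs.foldl pvStepB (PySem.Dict.empty, PySem.Dict.empty, 0)).1.values

-- ===== PRECONDITION & SPEC =====
def Spec_union_find (pairs : List (List Int)) (out : List (List Int)) : Prop := out = union_find_alt pairs
instance (pairs : List (List Int)) (out : List (List Int)) : Decidable (Spec_union_find pairs out) := by unfold Spec_union_find; infer_instance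

-- ===== CLAIM (what is proved, stated in full; the proofs are below) =====
def Claim_equal_union_find : Prop := ∀ (pairs : List (List Int)), Dom_union_find pairs → Spec_union_find pairs (union_find pairs)

-- ===== LEMMAS AND PROOFS =====

theorem pv_mem_foldl_union (L : List (List Int)) (p : List Int) (x : Int) :
    x ∈ L.foldl (fun q s => PySem.Set.union s q) p ↔ x ∈ p ∨ ∃ s ∈ L, x ∈ s := by
  induction L generalizing p with
  | nil => simp
  | cons s L ih =>
    simp only [List.foldl_cons, ih, PySem.Set.mem_union, List.mem_cons]
    constructor
    · rintro (⟨h | h⟩ | ⟨t, ht, hx⟩)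
      · exact .inr ⟨s, .inl rfl, h⟩
      · exact .inl h
      · exact .inr ⟨t, .inr ht, hx⟩
    · rintro (h | ⟨t, (rfl | ht), hx⟩)
      · exact .inl (.inr h)
      · exact .inl (.inl hx)
      · exact .inr ⟨t, ht, hx⟩

theorem pv_isdisjoint_union (g g' p : List Int) (h : ∀ x ∈ g', x ∉ g) :
    PySem.Set.isdisjoint g' (PySem.Set.union g p) = PySem.Set.isdisjoint g' p := by
  rw [Bool.eq_iff_iff, PySem.Set.isdisjoint_iff, PySem.Set.isdisjoint_iff]
  constructor
  · intro hall x hx hxp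
    exact hall x hx (by simp [PySem.Set.mem_union, hxp])
  · intro hall x hx hxu
    rcases (PySem.Set.mem_union _ _ _).mp hxu with h1 | h1
    · exact h x hx h1
    · exact hall x hx h1

theorem pv_foldA (gs : List (List Int)) (acc : List (List Int)) (p : List Int)
    (hd : gs.Pairwise (fun g g' => ∀ x ∈ g, x ∉ g')) :
    gs.foldl pvStepA (acc, p) =
      (acc ++ gs.filter (fun g => PySem.Set.isdisjoint g p),
       (gs.filter (fun g => !PySem.Set.isdisjoint g p)).foldl
         (fun q g => PySem.Set.union g q) p) := by
  induction gs generalizing acc p with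
  | nil => simp
  | cons g gs ih =>
    rcases List.pairwise_cons.mp hd with ⟨hg, htl⟩
    by_cases h : PySem.Set.isdisjoint g p = true
    · simp only [List.foldl_cons, pvStepA, h, if_true, List.filter_cons, Bool.not_true,
        Bool.false_eq_true, ite_true, ite_false]
      rw [ih (acc ++ [g]) p htl]
      simp
    · have hcong : ∀ g' ∈ gs, PySem.Set.isdisjoint g' (PySem.Set.union g p)
          = PySem.Set.isdisjoint g' p := by
        intro g' hg'
        exact pv_isdisjoint_union g g' p (fun x hx hxg => hg g' hg' x hxg hx)
      simp only [List.foldl_cons, pvStepA, h, if_false, List.filter_cons, Bool.not_false,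
        Bool.false_eq_true, ite_false, ite_true]
      rw [ih acc (PySem.Set.union g p) htl]
      have h1 : List.filter (fun g' => PySem.Set.isdisjoint g' (PySem.Set.union g p)) gs
          = List.filter (fun g' => PySem.Set.isdisjoint g' p) gs :=
        List.filter_congr (fun g' hg' => hcong g' hg')
      have h2 : List.filter (fun g' => !PySem.Set.isdisjoint g' (PySem.Set.union g p)) gs
          = List.filter (fun g' => !PySem.Set.isdisjoint g' p) gs :=
        List.filter_congr (fun g' hg' => by rw [hcong g' hg'])
      rw [h1, h2]

theorem pv_find?_filter_ne {ν : Type} (l : List (Int × ν)) (i j : Int) (h : j ≠ i) :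
    (l.filter (fun p => !(p.1 == i))).find? (fun p => p.1 == j)
      = l.find? (fun p => p.1 == j) := by
  induction l with
  | nil => rfl
  | cons e l ih =>
    have hij : (i == j) = false := by simp; omega
    by_cases he : e.1 = i
    · have hej : ¬ (e.1 = j) := by omega
      simp [List.filter_cons, he, List.find?_cons, hej, ih, hij]
    · by_cases hj : e.1 = j
      · simp [List.filter_cons, he, List.find?_cons, hj, h]
      · simp [List.filter_cons, he, List.find?_cons, hj, ih]

theorem pv_get?_erase_of_ne {ν : Type} (d : PySem.Dict Int ν) (i j : Int) (h : j ≠ i) :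
    (d.erase i).get? j = d.get? j := by
  obtain ⟨l⟩ := d
  simp only [PySem.Dict.erase, PySem.Dict.get?]
  rw [pv_find?_filter_ne l i j h]

theorem pv_getD_erase_of_ne (d : PySem.Dict Int (List Int)) (i j : Int) (h : j ≠ i) :
    (d.erase i).getD j PySem.Set.empty = d.getD j PySem.Set.empty := by
  rw [PySem.Dict.getD_eq_get?_getD, PySem.Dict.getD_eq_get?_getD, pv_get?_erase_of_ne d i j h]

theorem pv_foldB (K : List Int) (G : PySem.Dict Int (List Int)) (p : List Int)
    (hK : K.Nodup) :
    K.foldl pvMergeB (G, p) =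
      (PySem.Dict.mk (G.items.filter (fun e => !K.contains e.1)),
       (K.map (fun i => G.getD i PySem.Set.empty)).foldl (fun q s => PySem.Set.union s q) p) := by
  induction K generalizing G p with
  | nil => simp [PySem.Dict.ext_iff]
  | cons i K ih =>
    have hiK : i ∉ K := (List.nodup_cons.mp hK).1
    have hKnd : K.Nodup := (List.nodup_cons.mp hK).2
    simp only [List.foldl_cons]
    rw [show pvMergeB (G, p) i = (G.erase i, PySem.Set.union (G.getD i PySem.Set.empty) p) from rfl]
    rw [ih (G.erase i) _ hKnd, Prod.mk.injEq]
    constructor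
    · -- dicts agree
      show PySem.Dict.mk ((G.erase i).items.filter (fun e => !K.contains e.1)) = _
      have : (G.erase i).items = G.items.filter (fun e => !(e.1 == i)) := rfl
      rw [this, List.filter_filter]
      congr 1
      apply List.filter_congr
      intro e _
      by_cases h1 : e.1 = i <;> by_cases h2 : K.contains e.1 <;>
        simp_all [List.contains_cons]
    · -- pairs agree
      show _ = List.foldl _ p ((i :: K).map fun j => G.getD j PySem.Set.empty)
      rw [List.map_cons, List.foldl_cons]
      congr 1
      apply List.map_congr_left
      intro j hj
      exact pv_getD_erase_of_ne G i j (by rintro rfl; exact hiK hj)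

theorem pv_get?_foldl_insert (l : List Int) (W : PySem.Dict Int Int) (v y : Int) :
    (l.foldl (fun w x => w.insert x v) W).get? y
      = if y ∈ l then some v else W.get? y := by
  induction l generalizing W with
  | nil => simp
  | cons x l ih =>
    simp only [List.foldl_cons, ih, List.mem_cons]
    by_cases hy : y ∈ l
    · simp [hy]
    · by_cases hx : y = x
      · simp [hy, hx, PySem.Dict.get?_insert_self]
      · simp only [hy, hx, or_self, if_false]
        exact PySem.Dict.get?_insert_of_ne W v hx

-- in a dict with Nodup keys, entries are determined by their key

theorem pv_entry_eq {ν : Type} (d : PySem.Dict Int ν) (hnd : d.keys.Nodup)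
    (e f : Int × ν) (he : e ∈ d.items) (hf : f ∈ d.items) (h : e.1 = f.1) : e = f := by
  have h1 : d.get? e.1 = some e.2 := PySem.Dict.get?_of_mem_items d (by simpa using he) hnd
  have h2 : d.get? f.1 = some f.2 := PySem.Dict.get?_of_mem_items d (by simpa using hf) hnd
  rw [h] at h1; rw [h1] at h2
  exact Prod.ext h (by simpa using h2)

theorem pv_ids_eq (G : PySem.Dict Int (List Int)) (W : PySem.Dict Int Int) (p0 : List Int)
    (inv2 : (G.items.map Prod.fst).Pairwise (· < ·))
    (inv4 : ∀ x i, W.get? x = some i ↔ ∃ g, (i, g) ∈ G.items ∧ x ∈ g) :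
    PySem.List.sorted (PySem.Set.ofList (p0.filterMap (fun x => W.get? x))) (fun i => i) false
      = (G.items.filter (fun e => !PySem.Set.isdisjoint e.2 p0)).map Prod.fst := by
  have hsub : List.Sublist ((G.items.filter (fun e => !PySem.Set.isdisjoint e.2 p0)).map Prod.fst)
      (G.items.map Prod.fst) := List.Sublist.map _ List.filter_sublist
  have hpw : ((G.items.filter (fun e => !PySem.Set.isdisjoint e.2 p0)).map Prod.fst).Pairwise
      (fun a b => (a : Int) < b) := inv2.sublist hsub
  apply PySem.List.sorted_eq_of_perm_of_pairwise_lt _ _ _ ?_ hpw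
  rw [List.perm_ext_iff_of_nodup (hpw.imp ne_of_lt) (PySem.Set.nodup_ofList _)]
  intro a
  simp only [PySem.Set.mem_ofList, List.mem_filterMap, List.mem_map, List.mem_filter]
  constructor
  · rintro ⟨⟨i, g⟩, ⟨⟨hin, hov⟩, rfl⟩⟩
    have hx : ∃ x ∈ g, x ∈ p0 := by
      by_contra hc
      push_neg at hc
      have : PySem.Set.isdisjoint g p0 = true := (PySem.Set.isdisjoint_iff _ _).mpr hc
      rw [this] at hov
      simp at hov
    obtain ⟨x, hxg, hxp⟩ := hx
    exact ⟨x, hxp, (inv4 x _).mpr ⟨g, hin, hxg⟩⟩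
  · rintro ⟨x, hxp, hget⟩
    obtain ⟨g, hin, hxg⟩ := (inv4 x a).mp hget
    refine ⟨(a, g), ⟨hin, ?_⟩, rfl⟩
    simp only [Bool.not_eq_true']
    rw [Bool.eq_false_iff]
    intro hdj
    exact ((PySem.Set.isdisjoint_iff _ _).mp hdj) x hxg hxp

def pvInv (gs : List (List Int)) (G : PySem.Dict Int (List Int)) (W : PySem.Dict Int Int)
    (n : Int) : Prop :=
  gs = G.values ∧
  (G.items.map Prod.fst).Pairwise (· < ·) ∧
  (∀ i ∈ G.items.map Prod.fst, i < n) ∧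
  (∀ x i, W.get? x = some i ↔ ∃ g, (i, g) ∈ G.items ∧ x ∈ g)

theorem pvInv_step (gs : List (List Int)) (G : PySem.Dict Int (List Int))
    (W : PySem.Dict Int Int) (n : Int) (pr : List Int) (h : pvInv gs G W n) :
    pvInv ((gs.foldl pvStepA ([], PySem.Set.ofList pr)).1
        ++ [(gs.foldl pvStepA ([], PySem.Set.ofList pr)).2])
      (pvStepB (G, W, n) pr).1 (pvStepB (G, W, n) pr).2.1 (pvStepB (G, W, n) pr).2.2 := by
  obtain ⟨inv1, inv2, inv3, inv4⟩ := h
  have hndk : G.keys.Nodup := inv2.imp ne_of_lt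
  set p0 := PySem.Set.ofList pr with hp0
  set ov := G.items.filter (fun e => !PySem.Set.isdisjoint e.2 p0) with hovdef
  set kept := G.items.filter (fun e => PySem.Set.isdisjoint e.2 p0) with hkeptdef
  have hovsub : ∀ e ∈ ov, e ∈ G.items := fun e he => (List.mem_filter.mp he).1
  have hkeptsub : ∀ e ∈ kept, e ∈ G.items := fun e he => (List.mem_filter.mp he).1
  have hsubK : List.Sublist (ov.map Prod.fst) (G.items.map Prod.fst) :=
    List.Sublist.map _ List.filter_sublist
  have hKpw : (ov.map Prod.fst).Pairwise (· < ·) := inv2.sublist hsubK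
  have hKnd : (ov.map Prod.fst).Nodup := hKpw.imp ne_of_lt
  -- pairwise disjointness of the groups
  have hdisj_items : G.items.Pairwise (fun e f => ∀ x ∈ e.2, x ∉ f.2) := by
    refine List.Pairwise.imp_of_mem ?_ (List.pairwise_map.mp inv2)
    intro e f he hf hlt x hxe hxf
    have h1 := (inv4 x e.1).mpr ⟨e.2, by simpa using he, hxe⟩
    have h2 := (inv4 x f.1).mpr ⟨f.2, by simpa using hf, hxf⟩
    rw [h1] at h2
    exact absurd (Option.some.inj h2) (ne_of_lt hlt)
  have hgs : gs.Pairwise (fun g g' => ∀ x ∈ g, x ∉ g') := by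
    rw [inv1]
    exact List.pairwise_map.mpr hdisj_items
  -- the merged set
  have hmapF : (ov.map Prod.fst).map (fun i => G.getD i PySem.Set.empty) = ov.map Prod.snd := by
    rw [List.map_map]
    apply List.map_congr_left
    intro e he
    show G.getD e.1 PySem.Set.empty = e.2
    exact PySem.Dict.getD_of_mem_items G (by simpa using hovsub e he) hndk PySem.Set.empty
  set pairF := ((ov.map Prod.snd).foldl (fun q s => PySem.Set.union s q) p0) with hpairF
  -- B's kept dict entries are exactly the statically disjoint ones
  have hkeptB : G.items.filter (fun e => !((ov.map Prod.fst).contains e.1)) = kept := by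
    apply List.filter_congr
    intro e he
    by_cases hd : PySem.Set.isdisjoint e.2 p0 = true
    · have hnot : e.1 ∉ ov.map Prod.fst := by
        intro hmem
        obtain ⟨f, hf, hfe⟩ := List.mem_map.mp hmem
        have : f = e := pv_entry_eq G hndk f e (hovsub f hf) he hfe
        rw [this] at hf
        have := (List.mem_filter.mp hf).2
        rw [hd] at this
        simp at this
      simp [hd, hnot]
    · have hmem : e.1 ∈ ov.map Prod.fst :=
        List.mem_map.mpr ⟨e, List.mem_filter.mpr ⟨he, by simp [hd]⟩, rfl⟩
      replace hd : PySem.Set.isdisjoint e.2 p0 = false := Bool.eq_false_iff.mpr hd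
      simp [hd, hmem]
  -- evaluate B's step
  have hB : pvStepB (G, W, n) pr =
      ((PySem.Dict.mk kept).insert n pairF,
       pairF.foldl (fun w x => w.insert x n) W, n + 1) := by
    simp only [pvStepB]
    rw [pv_ids_eq G W p0 inv2 inv4, pv_foldB _ G p0 hKnd]
    simp only [hkeptB, hmapF]
    rfl
  rw [hB]
  -- new items list
  have hnotin : ((PySem.Dict.mk kept) : PySem.Dict Int (List Int)).contains n = false := by
    rw [Bool.eq_false_iff]
    intro hc
    have hmem : n ∈ kept.map Prod.fst := by
      simpa using (PySem.Dict.contains_iff_mem_keys _ _).mp hc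
    have : n ∈ G.items.map Prod.fst :=
      (List.Sublist.map Prod.fst (List.filter_sublist (l := G.items))).mem hmem
    exact absurd (inv3 n this) (lt_irrefl n)
  have hitems : (((PySem.Dict.mk kept) : PySem.Dict Int (List Int)).insert n pairF).items
      = kept ++ [(n, pairF)] := by
    rw [PySem.Dict.items_insert_of_not_contains _ _ hnotin]
  -- A's step, rewritten
  rw [pv_foldA gs [] p0 hgs]
  have hfilter1 : gs.filter (fun g => PySem.Set.isdisjoint g p0) = kept.map Prod.snd := by
    rw [inv1]
    show (G.items.map Prod.snd).filter _ = _
    rw [List.filter_map]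
    rfl
  have hfilter2 : gs.filter (fun g => !PySem.Set.isdisjoint g p0) = ov.map Prod.snd := by
    rw [inv1]
    show (G.items.map Prod.snd).filter _ = _
    rw [List.filter_map]
    rfl
  -- membership in the merged set
  have hmemF : ∀ x, x ∈ pairF ↔ x ∈ p0 ∨ ∃ e ∈ ov, x ∈ e.2 := by
    intro x
    rw [hpairF, pv_mem_foldl_union]
    constructor
    · rintro (hx | ⟨s, hs, hxs⟩)
      · exact .inl hx
      · obtain ⟨e, he, rfl⟩ := List.mem_map.mp hs
        exact .inr ⟨e, he, hxs⟩
    · rintro (hx | ⟨e, he, hxe⟩)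
      · exact .inl hx
      · exact .inr ⟨e.2, List.mem_map.mpr ⟨e, he, rfl⟩, hxe⟩
  have hvals : (((PySem.Dict.mk kept) : PySem.Dict Int (List Int)).insert n pairF).values
      = (kept ++ [(n, pairF)]).map Prod.snd := by
    show (((PySem.Dict.mk kept) : PySem.Dict Int (List Int)).insert n pairF).items.map _ = _
    rw [hitems]
  unfold pvInv
  refine ⟨?_, ?_, ?_, ?_⟩
  · -- values agree
    show _ = (((PySem.Dict.mk kept) : PySem.Dict Int (List Int)).insert n pairF).values
    rw [hvals]
    rw [List.map_append, hfilter1, hfilter2]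
    simp only [List.nil_append, List.map_cons, List.map_nil]
    rfl
  · -- keys strictly increasing
    show ((((PySem.Dict.mk kept) : PySem.Dict Int (List Int)).insert n pairF).items.map Prod.fst).Pairwise (· < ·)
    rw [hitems]
    rw [List.map_append, List.pairwise_append]
    refine ⟨inv2.sublist (List.Sublist.map Prod.fst List.filter_sublist), by simp, ?_⟩
    intro a ha b hb
    have : a ∈ G.items.map Prod.fst :=
      (List.Sublist.map Prod.fst (List.filter_sublist (l := G.items))).mem ha
    have hab : b = n := by simpa using hb
    rw [hab]
    exact inv3 a this
  · -- keys bounded by n+1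
    show ∀ i ∈ ((((PySem.Dict.mk kept) : PySem.Dict Int (List Int)).insert n pairF).items.map Prod.fst), i < n + 1
    rw [hitems]
    intro i hi
    rw [List.map_append, List.mem_append] at hi
    rcases hi with hi | hi
    · have : i ∈ G.items.map Prod.fst :=
        (List.Sublist.map Prod.fst (List.filter_sublist (l := G.items))).mem hi
      have := inv3 i this
      omega
    · have : i = n := by simpa using hi
      omega
  · -- where-map characterization
    intro x i
    show (pairF.foldl (fun w x => w.insert x n) W).get? x = some i ↔
      ∃ g, (i, g) ∈ (((PySem.Dict.mk kept) : PySem.Dict Int (List Int)).insert n pairF).items ∧ x ∈ g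
    rw [hitems, pv_get?_foldl_insert]
    by_cases hx : x ∈ pairF
    · simp only [hx, if_true]
      constructor
      · intro hni
        exact ⟨pairF, by simp [Option.some.inj hni], hx⟩
      · rintro ⟨g, hg, hxg⟩
        rcases List.mem_append.mp hg with hg | hg
        · exfalso
          have hgitems : (i, g) ∈ G.items := hkeptsub _ hg
          have hgdisj : PySem.Set.isdisjoint g p0 = true := by
            simpa using (List.mem_filter.mp hg).2
          rcases (hmemF x).mp hx with hxp | ⟨e, he, hxe⟩
          · exact (PySem.Set.isdisjoint_iff _ _).mp hgdisj x hxg hxp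
          · have h1 := (inv4 x e.1).mpr ⟨e.2, by simpa using hovsub e he, hxe⟩
            have h2 := (inv4 x i).mpr ⟨g, hgitems, hxg⟩
            rw [h1] at h2
            have : e = (i, g) := pv_entry_eq G hndk e (i, g) (hovsub e he) hgitems
              (Option.some.inj h2)
            rw [this] at he
            have := (List.mem_filter.mp he).2
            rw [show PySem.Set.isdisjoint (i, g).2 p0 = true from hgdisj] at this
            simp at this
        · have : i = n := by simpa using congrArg Prod.fst (by simpa using hg : (i, g) = (n, pairF))
          simp [this]
    · simp only [hx, if_false]
      rw [inv4 x i]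
      constructor
      · rintro ⟨g, hg, hxg⟩
        have hknot : PySem.Set.isdisjoint g p0 = true := by
          by_contra hc
          have hov : (i, g) ∈ ov := List.mem_filter.mpr
            ⟨hg, by simp only [Bool.not_eq_true']; exact Bool.eq_false_iff.mpr hc⟩
          exact hx ((hmemF x).mpr (.inr ⟨(i, g), hov, hxg⟩))
        exact ⟨g, List.mem_append.mpr (.inl (List.mem_filter.mpr ⟨hg, hknot⟩)), hxg⟩
      · rintro ⟨g, hg, hxg⟩
        rcases List.mem_append.mp hg with hg | hg
        · exact ⟨g, hkeptsub _ hg, hxg⟩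
        · exfalso
          have : g = pairF := by simpa using congrArg Prod.snd (by simpa using hg : (i, g) = (n, pairF))
          rw [this] at hxg
          exact hx hxg

theorem pv_main (rest : List (List Int)) (gs : List (List Int))
    (G : PySem.Dict Int (List Int)) (W : PySem.Dict Int Int) (n : Int)
    (h : pvInv gs G W n) :
    rest.foldl (fun groups pr =>
        let r := groups.foldl pvStepA ([], PySem.Set.ofList pr)
        r.1 ++ [r.2]) gs
      = ((rest.foldl pvStepB (G, W, n)).1).values := by
  induction rest generalizing gs G W n with
  | nil => exact h.1
  | cons pr rest ih =>
    simp only [List.foldl_cons]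
    exact ih _ _ _ _ (pvInv_step gs G W n pr h)

theorem pv_final (pairs : List (List Int)) : union_find pairs = union_find_alt pairs := by
  refine pv_main pairs [] PySem.Dict.empty PySem.Dict.empty 0 ⟨rfl, ?_, ?_, ?_⟩
  · simp [PySem.Dict.empty]
  · simp [PySem.Dict.empty]
  · intro x i
    simp [PySem.Dict.empty, PySem.Dict.get?]

-- ===== VERDICT (by name: the statement is the Claim_ definition above) =====
theorem union_find_spec : Claim_equal_union_find := by
  intro pairs _
  exact pv_final pairs
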